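-- pv_equiv track=rewrite | github.com/brulicm/programiranje-1 | izpiti/2019-01-24/3.naloga.py | skoki
-- ===== SOURCE A (Python) =====
-- from functools import lru_cache
--
-- def skoki(seznam):
--     k = len(seznam)
--
--     @lru_cache(maxsize=None)
--     def pomozna(pozicija, e):
--         if pozicija >= k - 1:
--             return 0
--         e += seznam[pozicija]
--         moznosti = [pomozna(pozicija + i, e - i)  for i in range(1, e + 1)]
--         return 1 + min(moznosti)
--     return pomozna(0, 0)
-- ===== SOURCE B (Python) =====
-- def skoki(seznam):
--     # Layered BFS over states (position, energy) instead of memoized top-down recursion.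
--     k = len(seznam)
--     frontier = {(0, 0)}
--     for d in range(k + 1):
--         if any(p >= k - 1 for (p, e) in frontier):
--             return d
--         nxt = set()
--         for (p, e) in frontier:
--             e2 = e + seznam[p]
--             for i in range(1, e2 + 1):
--                 nxt.add((p + i, e2 - i))
--         frontier = nxt
--     raise ValueError("cilj ni dosegljiv")
-- ===== Notes on version B (the rewrite author's own statement) =====
-- stated objective: alternative
-- what changed: Replaces the memoized top-down recursion (value = 1 + min over successor values) by an iterative layered breadth-first search over (position, energy) states from (0,0), returning the first layer index that contains a goal position.
import Mathlib
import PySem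

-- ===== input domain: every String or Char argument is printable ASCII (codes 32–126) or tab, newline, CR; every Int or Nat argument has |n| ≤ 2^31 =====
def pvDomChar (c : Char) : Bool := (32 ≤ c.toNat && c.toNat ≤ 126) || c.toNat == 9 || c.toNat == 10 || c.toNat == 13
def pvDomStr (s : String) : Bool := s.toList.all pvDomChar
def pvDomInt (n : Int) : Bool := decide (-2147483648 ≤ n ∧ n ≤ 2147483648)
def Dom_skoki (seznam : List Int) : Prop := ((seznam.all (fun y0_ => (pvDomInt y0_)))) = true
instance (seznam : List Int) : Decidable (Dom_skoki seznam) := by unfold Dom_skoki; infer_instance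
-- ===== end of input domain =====

-- B replaces A's memoized top-down recursion by an iterative layered BFS over (position, energy)
-- states; objective: alternative (same asymptotic cost). Equality of RETURN values is claimed on
-- Pre_skoki, exactly the inputs where the Python A returns (elsewhere Python A raises ValueError).

-- ===== PORT A =====
-- `none` = the Python helper raises (ValueError from min([]) / IndexError); `some m` = it returns m.
def pomoznaA (seznam : List Int) (k : Int) (p e : Int) : Option Int :=
  if _hng : p ≥ k - 1 then some 0
  else
    match PySem.List.pyGet? seznam p with
    | none => none
    | some v =>
      let opts := (PySem.List.pyRange 1 (e + v + 1)).attach.map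
        (fun i => pomoznaA seznam k (p + i.1) (e + v - i.1))
      if opts.any (fun o => o.isNone) then none
      else
        match PySem.List.min? opts.reduceOption (fun x => x) with
        | none => none
        | some m => some (1 + m)
termination_by (k - 1 - p).toNat
decreasing_by
  have h1 : 1 ≤ i.1 := (PySem.List.mem_pyRange_one.1 i.2).1
  omega

def skoki (seznam : List Int) : Int :=
  (pomoznaA seznam seznam.length 0 0).getD 0

-- ===== PORT B =====
-- one loop body: add all successor states of every state of the frontier to a fresh set
def nextFrontier (seznam : List Int) (f : PySem.Set (Int × Int)) : PySem.Set (Int × Int) :=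
  f.foldl (fun nxt s =>
    let e2 := s.2 + (PySem.List.pyGet? seznam s.1).getD 0
    (PySem.List.pyRange 1 (e2 + 1)).foldl (fun nxt2 i => PySem.Set.add nxt2 (s.1 + i, e2 - i)) nxt)
    PySem.Set.empty

-- 'for d in range(k+1)': fuel-counted loop; `none` = the loop runs out (B raises ValueError)
def bfsLoop (seznam : List Int) (k : Int) : Nat → Int → PySem.Set (Int × Int) → Option Int
  | 0, _, _ => none
  | fuel + 1, d, frontier =>
    if frontier.any (fun s => decide (s.1 ≥ k - 1)) then some d
    else bfsLoop seznam k fuel (d + 1) (nextFrontier seznam frontier)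

def skoki_alt (seznam : List Int) : Int :=
  (bfsLoop seznam seznam.length (seznam.length + 1) 0 (PySem.Set.ofList [((0 : Int), (0 : Int))])).getD 0

-- ===== PRECONDITION & SPEC =====
-- walk a candidate jump chain: from budget S at position p, a next position q is valid when
-- p < q ≤ S; the budget becomes S + seznam[q]; returns the final (budget, position) when valid
def chainRun (seznam : List Int) : Int → Nat → List Nat → Option (Int × Nat)
  | S, p, [] => some (S, p)
  | S, p, q :: qs =>
    if p < q ∧ (q : Int) ≤ S then chainRun seznam (S + seznam.getD q 0) q qs else none

-- a chain from position 0 whose final budget S is ≤ its final (non-goal) position: there the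
-- Python helper's list `moznosti` is empty and `min([])` raises ValueError
def chainDead (seznam : List Int) (c : List Nat) : Bool :=
  match c with
  | [] => false
  | q :: qs =>
    q == 0 &&
      match chainRun seznam (seznam.getD 0 0) 0 qs with
      | some (S, p) => decide (S ≤ (p : Int))
      | none => false

-- Pre_: exactly the inputs on which the Python A returns normally: no valid jump chain over
-- non-goal positions runs out of energy (on the complement A raises ValueError from min([])).
def Pre_skoki (seznam : List Int) : Prop :=
  ∀ c ∈ (List.range (seznam.length - 1)).sublists, chainDead seznam c = false

instance (seznam : List Int) : Decidable (Pre_skoki seznam) := by unfold Pre_skoki; infer_instance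

def pvWitness_skoki : List Int := [1, 1]

def Spec_skoki (seznam : List Int) (out : Int) : Prop := out = skoki_alt seznam
instance (seznam : List Int) (out : Int) : Decidable (Spec_skoki seznam out) := by unfold Spec_skoki; infer_instance

-- ===== CLAIM (what is proved, stated in full; the proofs are below) =====
def Claim_equal_skoki : Prop := ∀ (seznam : List Int), Dom_skoki seznam → Pre_skoki seznam → Spec_skoki seznam (skoki seznam)

-- ===== LEMMAS AND PROOFS =====

-- value of seznam[p] as A's recursion sees it on in-range positions
def gV (seznam : List Int) (p : Int) : Int := (PySem.List.pyGet? seznam p).getD 0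

-- states reachable from (0,0) in A's recursion (positions below the goal are expanded)
inductive ReachS (seznam : List Int) : Int × Int → Prop
  | base : ReachS seznam (0, 0)
  | step (p e i : Int) : ReachS seznam (p, e) → ¬ (p ≥ (seznam.length : Int) - 1) →
      i ∈ PySem.List.pyRange 1 (e + gV seznam p + 1) →
      ReachS seznam (p + i, e + gV seznam p - i)

theorem reach_nonneg (seznam : List Int) (s : Int × Int) (h : ReachS seznam s) : 0 ≤ s.1 := by
  induction h with
  | base => simp
  | step p e i _ _ hi ih =>
    have h1 : 1 ≤ i := (PySem.List.mem_pyRange_one.1 hi).1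
    simp only [] at ih ⊢
    omega

theorem pomoznaA_goal (seznam : List Int) (k p e : Int) (h : p ≥ k - 1) :
    pomoznaA seznam k p e = some 0 := by
  rw [pomoznaA]
  simp [h]

theorem chainRun_append (seznam : List Int) (xs ys : List Nat) (S : Int) (p : Nat) :
    chainRun seznam S p (xs ++ ys) =
      (chainRun seznam S p xs).bind (fun r => chainRun seznam r.1 r.2 ys) := by
  induction xs generalizing S p with
  | nil => simp [chainRun]
  | cons q qs ih =>
    simp only [List.cons_append, chainRun]
    split
    · exact ih _ _
    · simp

theorem chainRun_chain (seznam : List Int) (qs : List Nat) (S S' : Int) (p p' : Nat)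
    (h : chainRun seznam S p qs = some (S', p')) : List.IsChain (· < ·) (p :: qs) := by
  induction qs generalizing S p with
  | nil => simp
  | cons q qs ih =>
    rw [chainRun] at h
    split at h
    · rename_i hc
      exact (List.isChain_cons_cons).2 ⟨hc.1, ih _ _ h⟩
    · exact absurd h (by simp)

theorem chainRun_pairwise (seznam : List Int) (qs : List Nat) (S S' : Int) (p p' : Nat)
    (h : chainRun seznam S p qs = some (S', p')) : List.Pairwise (· < ·) (p :: qs) := by
  have := chainRun_chain seznam qs S S' p p' h
  exact List.isChain_iff_pairwise.mp this

theorem chain_sublist_range (c : List Nat) (n : Nat) (hs : List.Pairwise (· < ·) c)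
    (hb : ∀ x ∈ c, x < n) : c.Sublist (List.range n) := by
  have hnodc : c.Nodup := hs.imp ne_of_lt
  have hfilt : List.Pairwise (· < ·) ((List.range n).filter (fun x => decide (x ∈ c))) :=
    List.pairwise_lt_range.filter _
  have hperm : c.Perm ((List.range n).filter (fun x => decide (x ∈ c))) := by
    refine (List.perm_ext_iff_of_nodup hnodc (List.pairwise_lt_range.imp ne_of_lt |>.filter _)).2 ?_
    intro a
    simp only [List.mem_filter, List.mem_range, decide_eq_true_eq]
    exact ⟨fun ha => ⟨hb a ha, ha⟩, fun ha => ha.2⟩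
  have : c = (List.range n).filter (fun x => decide (x ∈ c)) :=
    hperm.eq_of_pairwise (fun a b _ _ h1 h2 => absurd h2 (lt_asymm h1)) hs hfilt
  rw [this]
  exact List.filter_sublist

-- every reachable non-goal state is the end of a valid chain from 0 over non-goal positions,
-- with energy e = S - seznam[p] - p
theorem gV_getD (seznam : List Int) (pn : Nat) (h : pn < seznam.length) :
    gV seznam (pn : Int) = seznam.getD pn 0 ∧
      PySem.List.pyGet? seznam (pn : Int) = some (seznam.getD pn 0) := by
  rw [gV, PySem.List.pyGet?_natCast, List.getD_eq_getElem?_getD]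
  simp [List.getElem?_eq_getElem h]

theorem reach_chain (seznam : List Int) (s : Int × Int) (h : ReachS seznam s)
    (hng : s.1 < (seznam.length : Int) - 1) :
    ∃ (qs : List Nat) (S : Int) (pn : Nat),
      chainRun seznam (seznam.getD 0 0) 0 qs = some (S, pn) ∧ (pn : Int) = s.1 ∧
      s.2 = S - seznam.getD pn 0 - (pn : Int) ∧
      (∀ x ∈ (0 : Nat) :: qs, (x : Int) < (seznam.length : Int) - 1) := by
  induction h with
  | base =>
    refine ⟨[], seznam.getD 0 0, 0, rfl, by simp, by simp, ?_⟩
    intro x hx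
    simp only [List.mem_singleton] at hx
    subst hx
    simpa using hng
  | step p e i hre hngp hi ih =>
    have hng' : p + i < (seznam.length : Int) - 1 := hng
    have hplt : p < (seznam.length : Int) - 1 := by omega
    obtain ⟨qs, S, pn, hrun, hpn, he, hbnd⟩ := ih hplt
    have hpn' : (pn : Int) = p := hpn
    have he' : e = S - seznam.getD pn 0 - (pn : Int) := he
    have hi1 : 1 ≤ i := (PySem.List.mem_pyRange_one.1 hi).1
    have hi2 : i < e + gV seznam p + 1 := (PySem.List.mem_pyRange_one.1 hi).2
    have hpnlen : pn < seznam.length := by omega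
    obtain ⟨hgv, -⟩ := gV_getD seznam pn hpnlen
    rw [← hpn'] at hplt hng' hi2 ⊢
    rw [hgv] at hi2 ⊢
    refine ⟨qs ++ [pn + i.toNat], S + seznam.getD (pn + i.toNat) 0, pn + i.toNat, ?_, by
        push_cast; omega, ?_, ?_⟩
    · rw [chainRun_append, hrun]
      simp only [Option.bind_some, chainRun]
      rw [if_pos ⟨by omega, by push_cast; omega⟩]
    · push_cast
      omega
    · intro x hx
      rcases List.mem_cons.1 hx with h0 | hx'
      · exact hbnd _ (by simp [h0])
      · rcases List.mem_append.1 hx' with hold | hnew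
        · exact hbnd _ (List.mem_cons_of_mem _ hold)
        · simp only [List.mem_singleton] at hnew
          subst hnew
          push_cast
          omega

theorem reach_inrange (seznam : List Int) (s : Int × Int) (h : ReachS seznam s)
    (hng : s.1 < (seznam.length : Int) - 1) :
    PySem.List.pyGet? seznam s.1 = some (gV seznam s.1) := by
  have h0 := reach_nonneg seznam s h
  obtain ⟨n, hn⟩ := Int.eq_ofNat_of_zero_le h0
  have hlt : n < seznam.length := by omega
  rw [gV, hn, PySem.List.pyGet?_natCast]
  simp [List.getElem?_eq_getElem hlt]

-- under Pre_, every reachable non-goal state has outgoing energy e2 ≥ 1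
theorem reach_e2_pos (seznam : List Int) (hpre : Pre_skoki seznam) (s : Int × Int)
    (h : ReachS seznam s) (hng : s.1 < (seznam.length : Int) - 1) :
    1 ≤ s.2 + gV seznam s.1 := by
  by_contra hcon
  obtain ⟨qs, S, pn, hrun, hpn, he, hbnd⟩ := reach_chain seznam s h hng
  have hpnlen : pn < seznam.length := by omega
  obtain ⟨hgv, -⟩ := gV_getD seznam pn hpnlen
  rw [← hpn, hgv] at hcon
  have hdead : chainDead seznam ((0 : Nat) :: qs) = true := by
    rw [chainDead, hrun]
    simp only [beq_self_eq_true, Bool.true_and, decide_eq_true_eq]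
    omega
  have hsub : ((0 : Nat) :: qs).Sublist (List.range (seznam.length - 1)) := by
    refine chain_sublist_range _ _ (chainRun_pairwise seznam qs _ S 0 pn hrun) ?_
    intro x hx
    have := hbnd x hx
    omega
  have := hpre ((0 : Nat) :: qs) (List.mem_sublists.2 hsub)
  rw [hdead] at this
  exact absurd this (by simp)

theorem pomoznaA_nongoal (seznam : List Int) (k p e v : Int) (h : ¬ p ≥ k - 1)
    (hv : PySem.List.pyGet? seznam p = some v) :
    pomoznaA seznam k p e =
      (let opts := (PySem.List.pyRange 1 (e + v + 1)).attach.map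
          (fun i => pomoznaA seznam k (p + i.1) (e + v - i.1));
        if opts.any (fun o => o.isNone) then none
        else
          match PySem.List.min? opts.reduceOption (fun x => x) with
          | none => none
          | some m => some (1 + m)) := by
  rw [pomoznaA, dif_neg h, hv]

-- unfolding of A's helper at a non-goal in-range state whose successors all return:
-- the value is 1 + (minimum successor value)
theorem pomoznaA_char (seznam : List Int) (k p e v : Int) (h : ¬ p ≥ k - 1)
    (hv : PySem.List.pyGet? seznam p = some v)
    (hall : ∀ i ∈ PySem.List.pyRange 1 (e + v + 1),
      (pomoznaA seznam k (p + i) (e + v - i)).isSome)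
    (hne : 1 ≤ e + v) :
    ∃ m, pomoznaA seznam k p e = some (1 + m) ∧
      (∃ i ∈ PySem.List.pyRange 1 (e + v + 1),
        pomoznaA seznam k (p + i) (e + v - i) = some m) ∧
      (∀ i ∈ PySem.List.pyRange 1 (e + v + 1), ∀ mi,
        pomoznaA seznam k (p + i) (e + v - i) = some mi → m ≤ mi) := by
  rw [pomoznaA_nongoal seznam k p e v h hv]
  simp only []
  have hany : ((PySem.List.pyRange 1 (e + v + 1)).attach.map
      (fun i => pomoznaA seznam k (p + i.1) (e + v - i.1))).any (fun o => o.isNone) = false := by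
    rw [List.any_eq_false]
    intro o ho
    rcases List.mem_map.1 ho with ⟨a, -, rfl⟩
    have := hall a.1 a.2
    rw [Option.isNone_iff_eq_none]
    exact Option.isSome_iff_ne_none.1 this
  rw [hany]
  have h1mem : (1 : Int) ∈ PySem.List.pyRange 1 (e + v + 1) :=
    PySem.List.mem_pyRange_one.2 ⟨le_refl 1, by omega⟩
  have h1some := hall 1 h1mem
  obtain ⟨m1, hm1⟩ := Option.isSome_iff_exists.1 h1some
  have hm1mem : m1 ∈ ((PySem.List.pyRange 1 (e + v + 1)).attach.map
      (fun i => pomoznaA seznam k (p + i.1) (e + v - i.1))).reduceOption := by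
    rw [List.reduceOption_mem_iff]
    exact List.mem_map.2 ⟨⟨1, h1mem⟩, List.mem_attach _ _, hm1⟩
  have hminne : PySem.List.min? ((PySem.List.pyRange 1 (e + v + 1)).attach.map
      (fun i => pomoznaA seznam k (p + i.1) (e + v - i.1))).reduceOption (fun x => x) ≠ none := by
    intro hcon
    rw [PySem.List.min?_eq_none_iff] at hcon
    rw [hcon] at hm1mem
    exact absurd hm1mem (List.not_mem_nil)
  obtain ⟨m, hm⟩ := Option.ne_none_iff_exists'.1 hminne
  rw [hm]
  refine ⟨m, rfl, ?_, ?_⟩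
  · have := PySem.List.min?_mem hm
    rw [List.reduceOption_mem_iff] at this
    rcases List.mem_map.1 this with ⟨a, -, ha⟩
    exact ⟨a.1, a.2, ha⟩
  · intro i hi mi hmi
    have hmem : mi ∈ ((PySem.List.pyRange 1 (e + v + 1)).attach.map
        (fun i => pomoznaA seznam k (p + i.1) (e + v - i.1))).reduceOption := by
      rw [List.reduceOption_mem_iff]
      exact List.mem_map.2 ⟨⟨i, hi⟩, List.mem_attach _ _, hmi⟩
    exact PySem.List.min?_isMin hm mi hmem

theorem A_nonneg (seznam : List Int) (k : Int) : ∀ (N : Nat) (p e m : Int),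
    (k - 1 - p).toNat ≤ N → pomoznaA seznam k p e = some m → 0 ≤ m := by
  intro N
  induction N with
  | zero =>
    intro p e m hN hsome
    have hp : p ≥ k - 1 := by omega
    rw [pomoznaA_goal seznam k p e hp] at hsome
    simp only [Option.some.injEq] at hsome
    omega
  | succ N ihN =>
    intro p e m hN hsome
    by_cases hp : p ≥ k - 1
    · rw [pomoznaA_goal seznam k p e hp] at hsome
      simp only [Option.some.injEq] at hsome
      omega
    · cases hget : PySem.List.pyGet? seznam p with
      | none =>
        rw [pomoznaA, dif_neg hp, hget] at hsome
        exact absurd hsome (by simp)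
      | some v =>
        rw [pomoznaA_nongoal seznam k p e v hp hget] at hsome
        simp only [] at hsome
        split at hsome
        · exact absurd hsome (by simp)
        · split at hsome
          · exact absurd hsome (by simp)
          · rename_i m0 hmin
            simp only [Option.some.injEq] at hsome
            have hmem := PySem.List.min?_mem hmin
            rw [List.reduceOption_mem_iff] at hmem
            rcases List.mem_map.1 hmem with ⟨a, -, ha⟩
            have ha1 : 1 ≤ a.1 := (PySem.List.mem_pyRange_one.1 a.2).1
            have := ihN (p + a.1) (e + v - a.1) m0 (by omega) ha
            omega

theorem A_isSome (seznam : List Int) (hpre : Pre_skoki seznam) : ∀ (N : Nat) (s : Int × Int),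
    ((seznam.length : Int) - 1 - s.1).toNat ≤ N → ReachS seznam s →
    (pomoznaA seznam seznam.length s.1 s.2).isSome := by
  intro N
  induction N with
  | zero =>
    intro s hN hre
    have hp : s.1 ≥ (seznam.length : Int) - 1 := by omega
    rw [pomoznaA_goal _ _ _ _ hp]
    rfl
  | succ N ihN =>
    intro s hN hre
    obtain ⟨p, e⟩ := s
    by_cases hp : p ≥ (seznam.length : Int) - 1
    · rw [pomoznaA_goal _ _ _ _ hp]
      rfl
    · have hv := reach_inrange seznam (p, e) hre (by omega)
      have hne := reach_e2_pos seznam hpre (p, e) hre (by omega)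
      simp only [] at hv hne
      obtain ⟨m, hm, -, -⟩ := pomoznaA_char seznam seznam.length p e (gV seznam p) hp hv
        (fun i hi => ihN (p + i, e + gV seznam p - i)
          (by
            have := (PySem.List.mem_pyRange_one.1 hi).1
            omega)
          (ReachS.step p e i hre hp hi)) hne
      rw [hm]
      rfl

theorem A_ub (seznam : List Int) (k : Int) : ∀ (N : Nat) (p e m : Int),
    (k - 1 - p).toNat ≤ N → ¬ (p ≥ k - 1) → pomoznaA seznam k p e = some m → m ≤ k - 1 - p := by
  intro N
  induction N with
  | zero =>
    intro p e m hN hp _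
    exact absurd (by omega : p ≥ k - 1) hp
  | succ N ihN =>
    intro p e m hN hp hsome
    cases hget : PySem.List.pyGet? seznam p with
    | none =>
      rw [pomoznaA, dif_neg hp, hget] at hsome
      exact absurd hsome (by simp)
    | some v =>
      rw [pomoznaA_nongoal seznam k p e v hp hget] at hsome
      simp only [] at hsome
      split at hsome
      · exact absurd hsome (by simp)
      · rename_i hany
        rw [Bool.not_eq_true] at hany
        split at hsome
        · exact absurd hsome (by simp)
        · rename_i m0 hmin
          simp only [Option.some.injEq] at hsome
          have hmem := PySem.List.min?_mem hmin
          rw [List.reduceOption_mem_iff] at hmem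
          rcases List.mem_map.1 hmem with ⟨a, -, ha⟩
          have hab := PySem.List.mem_pyRange_one.1 a.2
          have hev : 1 ≤ e + v := by omega
          have h1mem : (1 : Int) ∈ PySem.List.pyRange 1 (e + v + 1) :=
            PySem.List.mem_pyRange_one.2 ⟨le_refl 1, by omega⟩
          rw [List.any_eq_false] at hany
          have h1 := hany (pomoznaA seznam k (p + 1) (e + v - 1))
            (List.mem_map.2 ⟨⟨1, h1mem⟩, List.mem_attach _ _, rfl⟩)
          rw [Option.isNone_iff_eq_none] at h1
          obtain ⟨m1, hm1⟩ := Option.ne_none_iff_exists'.1 h1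
          have hm01 : m0 ≤ m1 := by
            refine PySem.List.min?_isMin hmin m1 ?_
            rw [List.reduceOption_mem_iff]
            exact List.mem_map.2 ⟨⟨1, h1mem⟩, List.mem_attach _ _, hm1⟩
          by_cases hp1 : p + 1 ≥ k - 1
          · rw [pomoznaA_goal seznam k (p + 1) (e + v - 1) hp1] at hm1
            simp only [Option.some.injEq] at hm1
            omega
          · have := ihN (p + 1) (e + v - 1) m1 (by omega) hp1 hm1
            omega

-- characterization of A's value at a reachable non-goal state under Pre_
theorem A_char (seznam : List Int) (hpre : Pre_skoki seznam) (s : Int × Int)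
    (hre : ReachS seznam s) (hng : ¬ (s.1 ≥ (seznam.length : Int) - 1)) :
    ∃ m, pomoznaA seznam seznam.length s.1 s.2 = some (1 + m) ∧
      (∃ i ∈ PySem.List.pyRange 1 (s.2 + gV seznam s.1 + 1),
        pomoznaA seznam seznam.length (s.1 + i) (s.2 + gV seznam s.1 - i) = some m) ∧
      (∀ i ∈ PySem.List.pyRange 1 (s.2 + gV seznam s.1 + 1), ∀ mi,
        pomoznaA seznam seznam.length (s.1 + i) (s.2 + gV seznam s.1 - i) = some mi → m ≤ mi) := by
  obtain ⟨p, e⟩ := s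
  simp only [] at hng ⊢
  have hv := reach_inrange seznam (p, e) hre (by omega)
  have hne := reach_e2_pos seznam hpre (p, e) hre (by omega)
  simp only [] at hv hne
  exact pomoznaA_char seznam seznam.length p e (gV seznam p) hng hv
    (fun i hi => A_isSome seznam hpre (((seznam.length : Int) - 1 - (p + i)).toNat)
      (p + i, e + gV seznam p - i) (le_refl _) (ReachS.step p e i hre hng hi)) hne

theorem mem_foldl_update (l : List (Int × Int)) (g : Int × Int → List (Int × Int)) :
    ∀ (acc : PySem.Set (Int × Int)) (t : Int × Int),
      t ∈ l.foldl (fun a s => PySem.Set.update a (g s)) acc ↔ t ∈ acc ∨ ∃ s ∈ l, t ∈ g s := by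
  induction l with
  | nil => simp
  | cons x xs ih =>
    intro acc t
    simp only [List.foldl_cons, ih, PySem.Set.mem_update, List.mem_cons]
    constructor
    · rintro ((h | h) | ⟨s, hs, ht⟩)
      · exact Or.inl h
      · exact Or.inr ⟨x, Or.inl rfl, h⟩
      · exact Or.inr ⟨s, Or.inr hs, ht⟩
    · rintro (h | ⟨s, (rfl | hs), ht⟩)
      · exact Or.inl (Or.inl h)
      · exact Or.inl (Or.inr ht)
      · exact Or.inr ⟨s, hs, ht⟩

theorem mem_nextFrontier (seznam : List Int) (f : PySem.Set (Int × Int)) (t : Int × Int) :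
    t ∈ nextFrontier seznam f ↔
      ∃ s ∈ f, ∃ i ∈ PySem.List.pyRange 1 (s.2 + gV seznam s.1 + 1),
        t = (s.1 + i, s.2 + gV seznam s.1 - i) := by
  have hbody : (fun (nxt : PySem.Set (Int × Int)) (s : Int × Int) =>
      let e2 := s.2 + (PySem.List.pyGet? seznam s.1).getD 0
      (PySem.List.pyRange 1 (e2 + 1)).foldl (fun nxt2 i => PySem.Set.add nxt2 (s.1 + i, e2 - i)) nxt)
      = (fun (nxt : PySem.Set (Int × Int)) (s : Int × Int) => PySem.Set.update nxt
          ((PySem.List.pyRange 1 (s.2 + gV seznam s.1 + 1)).map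
            (fun i => (s.1 + i, s.2 + gV seznam s.1 - i)))) := by
    funext nxt s
    simp only [PySem.Set.update, List.foldl_map]
    rfl
  rw [nextFrontier, hbody, mem_foldl_update]
  simp only [PySem.Set.empty, List.not_mem_nil, false_or, List.mem_map]
  constructor
  · rintro ⟨s, hs, i, hi, rfl⟩
    exact ⟨s, hs, i, hi, rfl⟩
  · rintro ⟨s, hs, i, hi, rfl⟩
    exact ⟨s, hs, i, hi, rfl⟩

theorem bfs_inv (seznam : List Int) (hpre : Pre_skoki seznam) : ∀ (fuel : Nat) (d n : Int)
    (F : PySem.Set (Int × Int)),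
    (∀ s ∈ F, ReachS seznam s) →
    (∃ s ∈ F, pomoznaA seznam seznam.length s.1 s.2 = some n) →
    (∀ s ∈ F, ∀ m, pomoznaA seznam seznam.length s.1 s.2 = some m → n ≤ m) →
    n < (fuel : Int) →
    bfsLoop seznam seznam.length fuel d F = some (d + n) := by
  intro fuel
  induction fuel with
  | zero =>
    intro d n F hreach hwit hmin hlt
    obtain ⟨s, hsF, hs⟩ := hwit
    have := A_nonneg seznam seznam.length (((seznam.length : Int) - 1 - s.1).toNat) s.1 s.2 n
      (le_refl _) hs
    omega
  | succ fuel ih =>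
    intro d n F hreach hwit hmin hlt
    rw [bfsLoop]
    cases hgoal : F.any (fun s => decide (s.1 ≥ (seznam.length : Int) - 1)) with
    | true =>
      rw [if_pos rfl]
      obtain ⟨s0, hs0F, hs0⟩ := List.any_eq_true.1 hgoal
      rw [decide_eq_true_eq] at hs0
      obtain ⟨s, hsF, hs⟩ := hwit
      have hn0 : 0 ≤ n := A_nonneg seznam seznam.length
        (((seznam.length : Int) - 1 - s.1).toNat) s.1 s.2 n (le_refl _) hs
      have hle : n ≤ 0 := hmin s0 hs0F 0 (pomoznaA_goal _ _ _ _ hs0)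
      have : n = 0 := le_antisymm hle hn0
      rw [this, add_zero]
    | false =>
      rw [if_neg (by simp)]
      rw [List.any_eq_false] at hgoal
      have hng : ∀ s ∈ F, ¬ (s.1 ≥ (seznam.length : Int) - 1) := by
        intro s hs
        have := hgoal s hs
        rwa [decide_eq_true_eq] at this
      have hstep : ∀ t ∈ nextFrontier seznam F, ∃ s ∈ F,
          ∃ i ∈ PySem.List.pyRange 1 (s.2 + gV seznam s.1 + 1),
            t = (s.1 + i, s.2 + gV seznam s.1 - i) :=
        fun t ht => (mem_nextFrontier seznam F t).1 ht
      have hreach' : ∀ t ∈ nextFrontier seznam F, ReachS seznam t := by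
        intro t ht
        obtain ⟨s, hsF, i, hi, rfl⟩ := hstep t ht
        have := ReachS.step s.1 s.2 i (by rw [Prod.mk.eta]; exact hreach s hsF) (hng s hsF) hi
        exact this
      obtain ⟨s, hsF, hs⟩ := hwit
      obtain ⟨m, hm, ⟨i0, hi0, hv0⟩, -⟩ := A_char seznam hpre s (hreach s hsF) (hng s hsF)
      have hnm : n = 1 + m := by
        rw [hs] at hm
        simpa using hm
      have hwit' : ∃ t ∈ nextFrontier seznam F,
          pomoznaA seznam seznam.length t.1 t.2 = some (n - 1) := by
        refine ⟨(s.1 + i0, s.2 + gV seznam s.1 - i0),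
          (mem_nextFrontier seznam F _).2 ⟨s, hsF, i0, hi0, rfl⟩, ?_⟩
        simp only []
        rw [hv0]
        congr 1
        omega
      have hmin' : ∀ t ∈ nextFrontier seznam F, ∀ mt,
          pomoznaA seznam seznam.length t.1 t.2 = some mt → n - 1 ≤ mt := by
        intro t ht mt hmt
        obtain ⟨s', hs'F, i, hi, rfl⟩ := hstep t ht
        obtain ⟨ms, hms, -, hmins⟩ := A_char seznam hpre s' (hreach s' hs'F) (hng s' hs'F)
        have h1 : ms ≤ mt := hmins i hi mt hmt
        have h2 : n ≤ 1 + ms := hmin s' hs'F (1 + ms) hms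
        omega
      have := ih (d + 1) (n - 1) (nextFrontier seznam F) hreach' hwit' hmin' (by omega)
      rw [this]
      congr 1
      omega

-- ===== VERDICT (by name: the statement is the Claim_ definition above) =====
theorem skoki_spec : Claim_equal_skoki := by
  intro seznam _ hpre
  unfold Spec_skoki skoki skoki_alt
  obtain ⟨n, hn⟩ := Option.isSome_iff_exists.1 (A_isSome seznam hpre
    (((seznam.length : Int) - 1 - 0).toNat) (0, 0) (le_refl _) ReachS.base)
  simp only [] at hn
  have hbound : n < (seznam.length : Int) + 1 := by
    by_cases h0 : (0 : Int) ≥ (seznam.length : Int) - 1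
    · rw [pomoznaA_goal _ _ _ _ h0] at hn
      simp only [Option.some.injEq] at hn
      omega
    · have := A_ub seznam seznam.length (((seznam.length : Int) - 1 - 0).toNat) 0 0 n
        (le_refl _) h0 hn
      omega
  have hbfs := bfs_inv seznam hpre (seznam.length + 1) 0 n
    (PySem.Set.ofList [((0 : Int), (0 : Int))])
    (by
      intro s hs
      rw [PySem.Set.mem_ofList] at hs
      simp only [List.mem_singleton] at hs
      subst hs
      exact ReachS.base)
    ⟨(0, 0), (PySem.Set.mem_ofList _ _).2 (by simp), hn⟩
    (by
      intro s hs m hm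
      rw [PySem.Set.mem_ofList] at hs
      simp only [List.mem_singleton] at hs
      subst hs
      rw [hn] at hm
      simp only [Option.some.injEq] at hm
      omega)
    (by push_cast; omega)
  rw [hn, hbfs]
  simp
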